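-- pv_equiv track=rewrite | github.com/WaffleDuffle/Python101 | Lab1/task_6/task06.py | func
-- ===== SOURCE A (Python) =====
-- def func(size):
--
--     romb = ""
--     size = size + 2 + (size+1) % 2  #adjust size for easier use
--     ################### TO DO #########################
--
--     puncte = ""
--     spatii = ""
--     for i in range(size//2):
--         spatii += " "
--         puncte += ".." #point and space vector for string slicing
--     for i in range(size//2):
--         romb += spatii[:size//2-1-i] + "@" + puncte[:-2*(size//2) + 2*i] + "@\n"
--     for i in range(size//2-2, -1, -1):
--         romb += spatii[:size//2-1-i] + "@" + puncte[:-2*(size//2) + 2*i] + "@\n"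
--
--     ###################################################
--
--     return romb
-- ===== SOURCE B (Python) =====
-- def func(size):
--     size = size + 2 + (size + 1) % 2  # adjust size, same as A
--     n = size // 2
--     out = ""
--     # one symmetric pass over all 2n-1 rows; i = distance-from-top of the row
--     for r in range(2 * n - 1):
--         i = (n - 1) - abs(r - (n - 1))
--         out += " " * (n - 1 - i) + "@" + "." * (2 * i) + "@\n"
--     return out
-- ===== Notes on version B (the rewrite author's own statement) =====
-- stated objective: simpler
-- what changed: Replaces A's slice-vector preparation loop plus two directed row loops with a single symmetric pass over all 2n-1 rows, computing each row directly from its distance to the centre via abs.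
import Mathlib
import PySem

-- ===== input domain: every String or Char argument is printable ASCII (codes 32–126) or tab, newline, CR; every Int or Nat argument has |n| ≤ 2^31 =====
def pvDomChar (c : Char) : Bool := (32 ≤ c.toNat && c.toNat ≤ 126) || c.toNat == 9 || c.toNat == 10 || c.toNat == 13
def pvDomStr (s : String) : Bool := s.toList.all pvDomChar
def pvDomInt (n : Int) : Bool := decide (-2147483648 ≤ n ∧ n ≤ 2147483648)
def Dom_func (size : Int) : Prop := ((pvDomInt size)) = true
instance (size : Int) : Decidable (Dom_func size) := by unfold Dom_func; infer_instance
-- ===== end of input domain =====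

-- B changes the decomposition (one symmetric pass over all rows via abs, instead of a
-- preparation loop plus two directed row loops); same output, same asymptotic cost.

-- ===== PORT A =====
-- strings are ported on the List Char side (PySem.Chars conventions); String.ofList at the end
def func (size : Int) : String :=
  let size2 := size + 2 + PySem.Int.mod (size + 1) 2
  let sp : List Char × List Char :=
    (PySem.List.pyRange 0 (PySem.Int.floordiv size2 2) 1).foldl
      (fun p _ => (p.1 ++ [' '], p.2 ++ ['.', '.'])) ([], [])
  let spatii := sp.1
  let puncte := sp.2
  let romb1 : List Char :=
    (PySem.List.pyRange 0 (PySem.Int.floordiv size2 2) 1).foldl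
      (fun acc i =>
        acc ++ PySem.List.slice spatii none (some (PySem.Int.floordiv size2 2 - 1 - i))
            ++ ['@']
            ++ PySem.List.slice puncte none (some (-2 * PySem.Int.floordiv size2 2 + 2 * i))
            ++ ['@', '\n']) []
  let romb2 : List Char :=
    (PySem.List.pyRange (PySem.Int.floordiv size2 2 - 2) (-1) (-1)).foldl
      (fun acc i =>
        acc ++ PySem.List.slice spatii none (some (PySem.Int.floordiv size2 2 - 1 - i))
            ++ ['@']
            ++ PySem.List.slice puncte none (some (-2 * PySem.Int.floordiv size2 2 + 2 * i))
            ++ ['@', '\n']) romb1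
  String.ofList romb2

-- ===== PORT B =====
def func_alt (size : Int) : String :=
  let size2 := size + 2 + PySem.Int.mod (size + 1) 2
  let n := PySem.Int.floordiv size2 2
  let out : List Char :=
    (PySem.List.pyRange 0 (2 * n - 1) 1).foldl
      (fun acc r =>
        let i := (n - 1) - |r - (n - 1)|
        acc ++ PySem.List.pyRepeat [' '] (n - 1 - i)
            ++ ['@']
            ++ PySem.List.pyRepeat ['.'] (2 * i)
            ++ ['@', '\n']) []
  String.ofList out

-- ===== PRECONDITION & SPEC =====
def Spec_func (size : Int) (out : String) : Prop := out = func_alt size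
instance (size : Int) (out : String) : Decidable (Spec_func size out) := by unfold Spec_func; infer_instance

-- ===== CLAIM (what is proved, stated in full; the proofs are below) =====
def Claim_equal_func : Prop := ∀ (size : Int), Dom_func size → Spec_func size (func size)

-- ===== LEMMAS AND PROOFS =====

-- the common row shape, as a function of n and the row's distance i from the top/bottom
def pvRow (n i : Int) : List Char :=
  List.replicate (n - 1 - i).toNat ' ' ++ ['@'] ++ List.replicate (2 * i).toNat '.' ++ ['@', '\n']

-- slice of the space vector is a replicate (for row indices 0 ≤ i < n)
theorem pvSliceSpace (n i : Int) (h0 : 0 ≤ i) (h1 : i < n) :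
    PySem.List.slice (List.replicate n.toNat ' ') none (some (n - 1 - i))
      = List.replicate (n - 1 - i).toNat ' ' := by
  rw [PySem.List.slice_to _ (by omega), List.take_replicate]
  congr 1
  omega

-- slice of the dot vector is a replicate (for row indices 0 ≤ i < n)
theorem pvSliceDot (n i : Int) (h0 : 0 ≤ i) (h1 : i < n) :
    PySem.List.slice (List.replicate (2 * n).toNat '.') none (some (-2 * n + 2 * i))
      = List.replicate (2 * i).toNat '.' := by
  have hk : -2 * n + 2 * i = -(((2 * (n - i)).toNat : Int)) := by omega
  rw [hk, PySem.List.slice_to_neg_natCast _ _ (by omega), List.length_replicate,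
    List.take_replicate]
  congr 1
  omega

-- A's row loops, over any index list with in-range indices, append the rows
theorem pvFoldA (n : Int) (l : List Int) (hmem : ∀ i ∈ l, 0 ≤ i ∧ i < n) (acc : List Char) :
    l.foldl
      (fun acc i =>
        acc ++ PySem.List.slice (List.replicate n.toNat ' ') none (some (n - 1 - i))
            ++ ['@']
            ++ PySem.List.slice (List.replicate (2 * n).toNat '.') none (some (-2 * n + 2 * i))
            ++ ['@', '\n']) acc
      = acc ++ l.flatMap (pvRow n) := by
  refine Eq.trans (PySem.List.foldl_congr_mem l _ (fun acc i => acc ++ pvRow n i) acc ?_)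
    (PySem.List.foldl_append_eq_flatMap _ _ _)
  intro acc i hi
  obtain ⟨h0, h1⟩ := hmem i hi
  rw [pvSliceSpace n i h0 h1, pvSliceDot n i h0 h1]
  simp [pvRow]

-- B's single loop appends the same rows, indexed through the abs formula
theorem pvFoldB (n : Int) (l : List Int) (acc : List Char) :
    l.foldl
      (fun acc r =>
        acc ++ PySem.List.pyRepeat [' '] (n - 1 - ((n - 1) - |r - (n - 1)|))
            ++ ['@']
            ++ PySem.List.pyRepeat ['.'] (2 * ((n - 1) - |r - (n - 1)|))
            ++ ['@', '\n']) acc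
      = acc ++ l.flatMap (fun r => pvRow n ((n - 1) - |r - (n - 1)|)) := by
  refine Eq.trans
    (PySem.List.foldl_congr_mem l _ (fun acc r => acc ++ pvRow n ((n - 1) - |r - (n - 1)|)) acc ?_)
    (PySem.List.foldl_append_eq_flatMap _ _ _)
  intro acc r _
  simp [pvRow, PySem.List.pyRepeat_singleton]

-- the preparation loop builds the space and dot vectors
theorem pvFlatConst (l : List Int) :
    l.flatMap (fun _ => (['.', '.'] : List Char)) = List.replicate (2 * l.length) '.' := by
  induction l with
  | nil => rfl
  | cons x t ih =>
      simp only [List.flatMap_cons, ih, List.length_cons]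
      rw [show 2 * (t.length + 1) = (2 * t.length + 1) + 1 by omega]
      simp [List.replicate_succ]

theorem pvPrep (n : Int) :
    (PySem.List.pyRange 0 n 1).foldl
        (fun (p : List Char × List Char) _ => (p.1 ++ [' '], p.2 ++ ['.', '.'])) ([], [])
      = (List.replicate n.toNat ' ', List.replicate (2 * n).toNat '.') := by
  rw [PySem.List.foldl_prod_mk (f := fun a _ => a ++ [' ']) (g := fun a _ => a ++ ['.', '.'])]
  rw [PySem.List.foldl_append_singleton_eq_map (f := fun _ => ' '),
    PySem.List.foldl_append_eq_flatMap (g := fun _ => ['.', '.']), pvFlatConst, List.map_const']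
  simp [PySem.List.length_pyRange_one]
  omega

-- B's row sequence splits into A's ascending and descending passes
theorem pvSplitRows (n : Int) (h : 1 ≤ n) :
    (PySem.List.pyRange 0 (2 * n - 1) 1).flatMap (fun r => pvRow n ((n - 1) - |r - (n - 1)|))
      = (PySem.List.pyRange 0 n 1).flatMap (pvRow n)
        ++ (PySem.List.pyRange (n - 2) (-1) (-1)).flatMap (pvRow n) := by
  rw [PySem.List.pyRange_one_append 0 n (2 * n - 1) (by omega) (by omega), List.flatMap_append]
  congr 1
  · refine List.flatMap_congr ?_
    intro r hr
    rw [PySem.List.mem_pyRange_one] at hr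
    congr 1
    rw [abs_of_nonpos (by omega)]
    omega
  · rw [PySem.List.pyRange_one, PySem.List.pyRange_neg_one, List.flatMap_map, List.flatMap_map]
    have he : (2 * n - 1 - n).toNat = (n - 2 - -1).toNat := by omega
    rw [he]
    refine List.flatMap_congr ?_
    intro k _
    congr 1
    have hk : (0 : Int) ≤ (k : Int) := Int.natCast_nonneg k
    rw [abs_of_nonneg (by omega)]
    omega

-- ===== VERDICT (by name: the statement is the Claim_ definition above) =====
theorem func_spec : Claim_equal_func := by
  intro size _
  unfold Spec_func func func_alt
  simp only [pvPrep]
  generalize PySem.Int.floordiv (size + 2 + PySem.Int.mod (size + 1) 2) 2 = n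
  rcases (by omega : n ≤ 0 ∨ 0 < n) with hn | hn
  · rw [PySem.List.pyRange_one_eq_nil (by omega), PySem.List.pyRange_one_eq_nil (by omega),
      PySem.List.pyRange_neg_one_eq_nil (by omega)]
    simp
  · rw [pvFoldA n _ (fun i hi => by rw [PySem.List.mem_pyRange_one] at hi; omega) [],
      pvFoldA n _ (fun i hi => by rw [PySem.List.mem_pyRange_neg_one] at hi; omega) _,
      pvFoldB, pvSplitRows n (by omega)]
    simp
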